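-- pv_equiv track=rewrite | github.com/maxmaupome14-ctrl/malak | api/src/routes/reviews.py | _compute_basic_sentiment
-- ===== SOURCE A (Python) =====
-- def _compute_basic_sentiment(reviews: list[dict]) -> dict:
--     """Compute basic sentiment breakdown from ratings."""
--     if not reviews:
--         return {"positive": 0, "neutral": 0, "negative": 0}
--
--     positive = sum(1 for r in reviews if r.get("rating", 0) >= 4)
--     neutral = sum(1 for r in reviews if r.get("rating", 0) == 3)
--     negative = sum(1 for r in reviews if r.get("rating", 0) <= 2)
--     total = len(reviews)
--
--     return {
--         "positive": round(positive / total * 100) if total else 0,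
--         "neutral": round(neutral / total * 100) if total else 0,
--         "negative": round(negative / total * 100) if total else 0,
--     }
-- ===== SOURCE B (Python) =====
-- def _bisect_left(a, x):
--     """Leftmost insertion point for x in sorted list a."""
--     lo, hi = 0, len(a)
--     while lo < hi:
--         mid = (lo + hi) // 2
--         if a[mid] < x:
--             lo = mid + 1
--         else:
--             hi = mid
--     return lo
--
--
-- def _bisect_right(a, x):
--     """Rightmost insertion point for x in sorted list a."""
--     lo, hi = 0, len(a)
--     while lo < hi:
--         mid = (lo + hi) // 2
--         if x < a[mid]:
--             hi = mid
--         else: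
--             lo = mid + 1
--     return lo
--
--
-- def _compute_basic_sentiment(reviews: list[dict]) -> dict:
--     """Compute basic sentiment breakdown from ratings (sort once, read bucket sizes off by binary search)."""
--     if not reviews:
--         return {"positive": 0, "neutral": 0, "negative": 0}
--
--     ratings = sorted(r.get("rating", 0) for r in reviews)
--     total = len(ratings)
--     positive = total - _bisect_left(ratings, 4)          # ratings >= 4
--     neutral = _bisect_right(ratings, 3) - _bisect_left(ratings, 3)   # ratings == 3
--     negative = _bisect_right(ratings, 2)                 # ratings <= 2
--
--     return {
--         "positive": round(positive / total * 100),
--         "neutral": round(neutral / total * 100),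
--         "negative": round(negative / total * 100),
--     }
-- ===== Notes on version B (the rewrite author's own statement) =====
-- stated objective: alternative
-- what changed: B sorts the ratings once and reads each bucket size off the sorted list with binary searches (positive = total - bisect_left(4), neutral = bisect_right(3) - bisect_left(3), negative = bisect_right(2)) instead of A's three linear counting passes over the reviews; the empty-list early return and the round(count/total*100) percentages are unchanged.
import Mathlib
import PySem

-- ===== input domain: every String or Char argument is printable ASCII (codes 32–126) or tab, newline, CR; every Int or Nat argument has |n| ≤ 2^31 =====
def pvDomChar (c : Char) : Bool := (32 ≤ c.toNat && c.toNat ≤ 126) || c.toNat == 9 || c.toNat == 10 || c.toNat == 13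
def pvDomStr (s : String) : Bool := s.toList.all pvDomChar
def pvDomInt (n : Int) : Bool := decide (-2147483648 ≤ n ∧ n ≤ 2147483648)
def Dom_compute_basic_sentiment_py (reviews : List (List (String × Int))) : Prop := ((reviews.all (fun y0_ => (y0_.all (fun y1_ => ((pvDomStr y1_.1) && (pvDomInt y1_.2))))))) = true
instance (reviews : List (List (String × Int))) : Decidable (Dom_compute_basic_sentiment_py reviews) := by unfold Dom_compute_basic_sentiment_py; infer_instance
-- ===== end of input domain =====

-- B changes the algorithm: sort the ratings once, then read each bucket size off the sorted
-- list with binary searches, instead of A's three linear counting passes (objective: alternative).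
-- Both Pythons compute round(count/total*100) on IEEE doubles; pvRoundPct below is an exact
-- integer-arithmetic transliteration of that float expression (nearest-double division, nearest-double
-- multiplication by 100, then Python round's half-to-even), shared by both ports.

-- ===== PORT A =====

-- round-to-nearest-even of p/q (p ≥ 0, q > 0), exact
def pvRndNE (p q : Nat) : Nat :=
  let d := p / q
  let r := p % q
  if 2 * r < q then d
  else if 2 * r > q then d + 1
  else if d % 2 = 0 then d else d + 1

-- adjust the exponent guess until the mantissa lands in [2^52, 2^53); fuel is ample (guess off by ≤ 2)
def pvNdAdjust (num den : Nat) (e : Int) : Nat → Nat × Int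
  | 0 => (0, 0)
  | fuel + 1 =>
    let m := if 0 ≤ e then pvRndNE num (den <<< e.toNat) else pvRndNE (num <<< (-e).toNat) den
    if 2 ^ 53 ≤ m then pvNdAdjust num den (e + 1) fuel
    else if m < 2 ^ 52 then pvNdAdjust num den (e - 1) fuel
    else (m, e)

-- nearest IEEE double to num/den (num ≥ 0, den > 0), as (mantissa, exponent): value = m·2^e
def pvNearestDouble (num den : Nat) : Nat × Int :=
  if num = 0 then (0, 0)
  else pvNdAdjust num den ((Nat.log2 num : Int) - (Nat.log2 den : Int) - 53) 8

-- exact model of Python's round(c/t * 100) for ints 0 ≤ c, 0 < t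
def pvRoundPct (c t : Int) : Int :=
  let p1 := pvNearestDouble c.natAbs t.natAbs
  let num := p1.1 * 100 * (if 0 ≤ p1.2 then 2 ^ p1.2.toNat else 1)
  let den := if 0 ≤ p1.2 then 1 else 2 ^ (-p1.2).toNat
  let p2 := pvNearestDouble num den
  ((if 0 ≤ p2.2 then p2.1 * 2 ^ p2.2.toNat else pvRndNE p2.1 (2 ^ (-p2.2).toNat) : Nat) : Int)

-- port of A: three separate counting passes (sum(1 for r in reviews if …)), then the dict
def compute_basic_sentiment_py (reviews : List (List (String × Int))) : List (String × Int) :=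
  if reviews = [] then [("positive", 0), ("neutral", 0), ("negative", 0)]
  else
    let positive : Int := reviews.foldl (fun acc r => if PySem.Dict.getD (PySem.Dict.mk r) "rating" 0 ≥ 4 then acc + 1 else acc) 0
    let neutral : Int := reviews.foldl (fun acc r => if PySem.Dict.getD (PySem.Dict.mk r) "rating" 0 = 3 then acc + 1 else acc) 0
    let negative : Int := reviews.foldl (fun acc r => if PySem.Dict.getD (PySem.Dict.mk r) "rating" 0 ≤ 2 then acc + 1 else acc) 0
    let total : Int := reviews.length
    [("positive", if total ≠ 0 then pvRoundPct positive total else 0),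
     ("neutral", if total ≠ 0 then pvRoundPct neutral total else 0),
     ("negative", if total ≠ 0 then pvRoundPct negative total else 0)]

-- ===== PORT B =====
-- Source B's hand-written _bisect_left/_bisect_right are exactly the lo/hi halving loop that
-- PySem.List.bisectLeft / bisectRight implement (same midpoint, same comparison, same updates),
-- so they are ported as those primitives; sorted(...) is PySem.List.sorted.
def compute_basic_sentiment_py_alt (reviews : List (List (String × Int))) : List (String × Int) :=
  if reviews = [] then [("positive", 0), ("neutral", 0), ("negative", 0)]
  else
    let ratings := PySem.List.sorted (reviews.map (fun r => PySem.Dict.getD (PySem.Dict.mk r) "rating" 0)) (fun x => x) false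
    let total : Int := ratings.length
    let positive : Int := total - (PySem.List.bisectLeft ratings 4 : Int)
    let neutral : Int := (PySem.List.bisectRight ratings 3 : Int) - (PySem.List.bisectLeft ratings 3 : Int)
    let negative : Int := (PySem.List.bisectRight ratings 2 : Int)
    [("positive", pvRoundPct positive total),
     ("neutral", pvRoundPct neutral total),
     ("negative", pvRoundPct negative total)]

-- ===== PRECONDITION & SPEC =====
def Spec_compute_basic_sentiment_py (reviews : List (List (String × Int))) (out : List (String × Int)) : Prop := out = compute_basic_sentiment_py_alt reviews
instance (reviews : List (List (String × Int))) (out : List (String × Int)) : Decidable (Spec_compute_basic_sentiment_py reviews out) := by unfold Spec_compute_basic_sentiment_py; infer_instance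

-- ===== CLAIM (what is proved, stated in full; the proofs are below) =====
def Claim_equal_compute_basic_sentiment_py : Prop := ∀ (reviews : List (List (String × Int))), Dom_compute_basic_sentiment_py reviews → Spec_compute_basic_sentiment_py reviews (compute_basic_sentiment_py reviews)

-- ===== LEMMAS AND PROOFS =====

-- a list whose first r elements satisfy p and whose remaining elements do not has countP p = r
theorem pv_countP_split (p : Int → Bool) (xs : List Int) (r : Nat) (hr : r ≤ xs.length)
    (h1 : ∀ (j : Nat) (hj : j < xs.length), j < r → p xs[j])
    (h2 : ∀ (j : Nat) (hj : j < xs.length), r ≤ j → ¬ p xs[j] = true) :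
    xs.countP p = r := by
  have hx : xs = xs.take r ++ xs.drop r := (List.take_append_drop r xs).symm
  rw [hx, List.countP_append]
  have ht : (xs.take r).countP p = (xs.take r).length := by
    rw [List.countP_eq_length]
    intro a ha
    obtain ⟨i, hi, rfl⟩ := List.mem_iff_getElem.1 ha
    rw [List.getElem_take]
    exact h1 _ _ (by simp at hi; omega)
  have hd : (xs.drop r).countP p = 0 := by
    rw [List.countP_eq_zero]
    intro a ha
    obtain ⟨i, hi, rfl⟩ := List.mem_iff_getElem.1 ha
    rw [List.getElem_drop]
    exact h2 _ _ (by omega)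
  rw [ht, hd, List.length_take]
  omega

-- on a sorted list, bisect_left x is the number of elements < x
theorem pv_bisectLeft_count (xs : List Int) (x : Int)
    (hs : List.Pairwise (fun a b => a ≤ b) xs) :
    xs.countP (fun v => decide (v < x)) = PySem.List.bisectLeft xs x := by
  obtain ⟨hle, h1, h2⟩ := PySem.List.bisectLeft_spec xs x hs
  exact pv_countP_split _ xs _ hle (fun j hj hlt => by simpa using h1 j hj hlt)
    (fun j hj hge => by simpa using h2 j hj hge)

-- on a sorted list, bisect_right x is the number of elements ≤ x
theorem pv_bisectRight_count (xs : List Int) (x : Int)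
    (hs : List.Pairwise (fun a b => a ≤ b) xs) :
    xs.countP (fun v => decide (v ≤ x)) = PySem.List.bisectRight xs x := by
  obtain ⟨hle, h1, h2⟩ := PySem.List.bisectRight_spec xs x hs
  exact pv_countP_split _ xs _ hle (fun j hj hlt => by simpa using h1 j hj hlt)
    (fun j hj hge => by simpa using h2 j hj hge)

-- count(≤ x) splits as count(< x) + count(= x)
theorem pv_countP_le_split (x : Int) (l : List Int) :
    l.countP (fun v => decide (v ≤ x)) = l.countP (fun v => decide (v < x)) + l.countP (fun v => decide (v = x)) := by
  induction l with
  | nil => rfl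
  | cons a l ih =>
    simp only [List.countP_cons, ih]
    rcases lt_trichotomy a x with h | h | h
    · simp [h, le_of_lt h, ne_of_lt h]; omega
    · simp [h]; omega
    · simp [not_le.2 h, not_lt.2 (le_of_lt h), ne_of_gt h]

-- length splits as count(< x) + count(x ≤ ·)
theorem pv_length_split (x : Int) (l : List Int) :
    l.length = l.countP (fun v => decide (v < x)) + l.countP (fun v => decide (x ≤ v)) := by
  induction l with
  | nil => rfl
  | cons a l ih =>
    simp only [List.countP_cons, List.length_cons, ih]
    by_cases h : a < x
    · simp [h, not_le.2 h]; omega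
    · simp [h, not_lt.1 h]; omega

-- ===== VERDICT (by name: the statement is the Claim_ definition above) =====
theorem compute_basic_sentiment_py_spec : Claim_equal_compute_basic_sentiment_py := by
  intro reviews _
  unfold Spec_compute_basic_sentiment_py compute_basic_sentiment_py compute_basic_sentiment_py_alt
  by_cases h : reviews = []
  · simp [h]
  · simp only [if_neg h]
    set s := PySem.List.sorted (reviews.map (fun r => PySem.Dict.getD (PySem.Dict.mk r) "rating" 0)) (fun x => x) false with hsrt
    have hperm : s.Perm (reviews.map (fun r => PySem.Dict.getD (PySem.Dict.mk r) "rating" 0)) :=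
      PySem.List.sorted_perm _ (fun x => x) false
    have hpair : List.Pairwise (fun a b : Int => a ≤ b) s :=
      PySem.List.sorted_pairwise _ (fun x => x)
    have hlen : (s.length : Int) = (reviews.length : Int) := by
      rw [hperm.length_eq, List.length_map]
    have hcnt : ∀ p : Int → Bool,
        reviews.countP (fun r => p (PySem.Dict.getD (PySem.Dict.mk r) "rating" 0)) = s.countP p := by
      intro p
      rw [hperm.countP_eq, List.countP_map]
      rfl
    have hge : s.countP (fun v => decide (v ≥ 4)) = s.countP (fun v => decide (4 ≤ v)) := by
      simp only [ge_iff_le]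
    have hpos : reviews.foldl (fun acc r => if PySem.Dict.getD (PySem.Dict.mk r) "rating" 0 ≥ 4 then acc + 1 else acc) (0 : Int)
        = (s.length : Int) - (PySem.List.bisectLeft s 4 : Int) := by
      rw [PySem.List.foldl_ite_add_one (fun r => PySem.Dict.getD (PySem.Dict.mk r) "rating" 0 ≥ 4) reviews 0]
      have h1 : reviews.countP (fun r => decide (PySem.Dict.getD (PySem.Dict.mk r) "rating" 0 ≥ 4))
          = s.countP (fun v => decide (v ≥ 4)) := hcnt (fun v => decide (v ≥ 4))
      have h2 := pv_bisectLeft_count s 4 hpair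
      have h3 := pv_length_split 4 s
      omega
    have hneu : reviews.foldl (fun acc r => if PySem.Dict.getD (PySem.Dict.mk r) "rating" 0 = 3 then acc + 1 else acc) (0 : Int)
        = (PySem.List.bisectRight s 3 : Int) - (PySem.List.bisectLeft s 3 : Int) := by
      rw [PySem.List.foldl_ite_add_one (fun r => PySem.Dict.getD (PySem.Dict.mk r) "rating" 0 = 3) reviews 0]
      have h1 : reviews.countP (fun r => decide (PySem.Dict.getD (PySem.Dict.mk r) "rating" 0 = 3))
          = s.countP (fun v => decide (v = 3)) := hcnt (fun v => decide (v = 3))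
      have h2 := pv_bisectLeft_count s 3 hpair
      have h3 := pv_bisectRight_count s 3 hpair
      have h4 := pv_countP_le_split 3 s
      omega
    have hneg : reviews.foldl (fun acc r => if PySem.Dict.getD (PySem.Dict.mk r) "rating" 0 ≤ 2 then acc + 1 else acc) (0 : Int)
        = (PySem.List.bisectRight s 2 : Int) := by
      rw [PySem.List.foldl_ite_add_one (fun r => PySem.Dict.getD (PySem.Dict.mk r) "rating" 0 ≤ 2) reviews 0]
      have h1 : reviews.countP (fun r => decide (PySem.Dict.getD (PySem.Dict.mk r) "rating" 0 ≤ 2))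
          = s.countP (fun v => decide (v ≤ 2)) := hcnt (fun v => decide (v ≤ 2))
      have h2 := pv_bisectRight_count s 2 hpair
      omega
    have hne : (reviews.length : Int) ≠ 0 := by
      simpa using fun hz => h (List.length_eq_zero_iff.1 hz)
    simp only [hpos, hneu, hneg, if_pos hne, hlen]
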